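-- pv_equiv track=rewrite | github.com/CharbelElBateh/IDPA-countries-TED | src/collection/wikitext_cleaner.py | _remove_all_outermost_templates
-- ===== SOURCE A (Python) =====
-- def _remove_all_outermost_templates(text: str) -> str:
--     result = []
--     depth = 0
--     i = 0
--     while i < len(text):
--         if text[i:i+2] == '{{':
--             depth += 1
--             i += 2
--         elif text[i:i+2] == '}}':
--             depth -= 1
--             i += 2
--         else:
--             if depth == 0:
--                 result.append(text[i])
--             i += 1
--     return ''.join(result)
-- ===== SOURCE B (Python) =====
-- def _remove_all_outermost_templates(text: str) -> str:
--     kept = []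
--     depth = 0
--     rest = text
--     while True:
--         o = rest.find('{{')
--         c = rest.find('}}')
--         if o < 0 and c < 0:
--             if depth == 0:
--                 kept.append(rest)
--             break
--         if c < 0 or (0 <= o < c):
--             if depth == 0:
--                 kept.append(rest[:o])
--             depth += 1
--             rest = rest[o + 2:]
--         else:
--             if depth == 0:
--                 kept.append(rest[:c])
--             depth -= 1
--             rest = rest[c + 2:]
--     return ''.join(kept)
-- ===== Notes on version B (the rewrite author's own statement) =====
-- stated objective: faster
-- what changed: Instead of testing a two-character slice at every single index, B jumps between brace markers with str.find, emitting whole inter-marker slices when depth is 0, so the Python-level loop body runs once per marker rather than once per character.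
import Mathlib
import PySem

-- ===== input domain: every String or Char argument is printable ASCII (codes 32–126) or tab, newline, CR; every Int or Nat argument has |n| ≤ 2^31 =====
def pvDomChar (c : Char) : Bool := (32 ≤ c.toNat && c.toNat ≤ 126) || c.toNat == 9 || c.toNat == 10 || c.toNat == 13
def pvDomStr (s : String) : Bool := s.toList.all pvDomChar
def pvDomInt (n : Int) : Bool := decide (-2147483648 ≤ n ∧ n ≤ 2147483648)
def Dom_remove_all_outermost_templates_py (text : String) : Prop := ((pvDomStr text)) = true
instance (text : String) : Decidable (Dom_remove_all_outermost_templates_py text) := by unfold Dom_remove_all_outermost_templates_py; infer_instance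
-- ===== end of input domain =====

-- B replaces A's per-character depth scan by find-driven jumps between '{{'/'}}' markers,
-- emitting whole marker-free slices when depth is 0 (objective: faster; measured).


-- ===== PORT A =====
-- A's while-loop over index i, as structural recursion over the remaining suffix;
-- 'text[i:i+2] == "{{"' is the take-2 comparison on that suffix.
def pvGoA : List Char → Int → List Char
  | [], _ => []
  | c :: r, depth =>
    if (c :: r).take 2 = ['{', '{'] then pvGoA r.tail (depth + 1)
    else if (c :: r).take 2 = ['}', '}'] then pvGoA r.tail (depth - 1)
    else (if depth = 0 then [c] else []) ++ pvGoA r depth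
termination_by t _ => t.length
decreasing_by
  · simp only [List.length_cons, List.length_tail]; omega
  · simp only [List.length_cons, List.length_tail]; omega
  · simp

def remove_all_outermost_templates_py (text : String) : String :=
  String.ofList (pvGoA text.toList 0)

-- ===== PORT B =====
-- Source B's 'while True' loop over the remaining suffix; fuel (length+1) only makes it total:
-- every continuing iteration drops at least 2 characters, so the fuel is never exhausted.
def pvGoB : Nat → List Char → Int → List (List Char)
  | 0, _, _ => []
  | fuel + 1, rest, depth =>
    let o := PySem.Chars.find rest ['{', '{']
    let c := PySem.Chars.find rest ['}', '}']
    if o < 0 ∧ c < 0 then (if depth = 0 then [rest] else [])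
    else if c < 0 ∨ (0 ≤ o ∧ o < c) then
      (if depth = 0 then [rest.take o.toNat] else []) ++
        pvGoB fuel (rest.drop (o.toNat + 2)) (depth + 1)
    else
      (if depth = 0 then [rest.take c.toNat] else []) ++
        pvGoB fuel (rest.drop (c.toNat + 2)) (depth - 1)

def remove_all_outermost_templates_py_alt (text : String) : String :=
  String.ofList (PySem.Chars.join [] (pvGoB (text.toList.length + 1) text.toList 0))

-- ===== PRECONDITION & SPEC =====
def Spec_remove_all_outermost_templates_py (text : String) (out : String) : Prop := out = remove_all_outermost_templates_py_alt text
instance (text : String) (out : String) : Decidable (Spec_remove_all_outermost_templates_py text out) := by unfold Spec_remove_all_outermost_templates_py; infer_instance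

-- ===== CLAIM (what is proved, stated in full; the proofs are below) =====
def Claim_equal_remove_all_outermost_templates_py : Prop := ∀ (text : String), Dom_remove_all_outermost_templates_py text → Spec_remove_all_outermost_templates_py text (remove_all_outermost_templates_py text)

-- ===== LEMMAS AND PROOFS =====

lemma pvPrefix_two_iff (a b : Char) (l : List Char) : [a, b] <+: l ↔ l.take 2 = [a, b] := by
  cases l with
  | nil => simp [List.IsPrefix]
  | cons x r =>
    cases r with
    | nil => simp [List.IsPrefix]
    | cons y s =>
      constructor
      · rintro ⟨t, ht⟩
        simp at ht
        simp [ht.1, ht.2.1]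
      · intro h
        simp at h
        exact ⟨s, by simp [h.1, h.2]⟩

-- ''.join with empty separator is flatten
lemma pvJoin_nil (ps : List (List Char)) : PySem.Chars.join [] ps = ps.flatten := by
  show List.intercalate [] ps = ps.flatten
  induction ps with
  | nil => rfl
  | cons p ps ih =>
    cases ps with
    | nil => simp [List.intercalate]
    | cons q qs =>
      have h : List.intercalate [] (p :: q :: qs) = p ++ List.intercalate [] (q :: qs) := by
        simp [List.intercalate, List.intersperse]
      rw [h, ih]; simp

-- if neither marker occurs anywhere, A keeps everything at depth 0 and nothing otherwise
lemma pvGoA_nomarker (t : List Char) (d : Int)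
    (hO : ∀ j, ¬ ['{', '{'] <+: t.drop j) (hC : ∀ j, ¬ ['}', '}'] <+: t.drop j) :
    pvGoA t d = if d = 0 then t else [] := by
  induction t with
  | nil => simp [pvGoA]
  | cons c r ih =>
    have h1 : ¬ (c :: r).take 2 = ['{', '{'] := by
      intro h; exact hO 0 (by simpa using (pvPrefix_two_iff '{' '{' (c :: r)).mpr h)
    have h2 : ¬ (c :: r).take 2 = ['}', '}'] := by
      intro h; exact hC 0 (by simpa using (pvPrefix_two_iff '}' '}' (c :: r)).mpr h)
    rw [pvGoA, if_neg h1, if_neg h2,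
      ih (fun j => by simpa using hO (j + 1)) (fun j => by simpa using hC (j + 1))]
    split <;> simp

-- peeling a marker-free block u off the front of A's scan
lemma pvGoA_skip (u t : List Char) (d : Int)
    (hO : ∀ j < u.length, ¬ ['{', '{'] <+: (u ++ t).drop j)
    (hC : ∀ j < u.length, ¬ ['}', '}'] <+: (u ++ t).drop j) :
    pvGoA (u ++ t) d = (if d = 0 then u else []) ++ pvGoA t d := by
  induction u generalizing d with
  | nil => split <;> simp
  | cons c u' ih =>
    have h1 : ¬ (c :: (u' ++ t)).take 2 = ['{', '{'] := by
      intro h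
      exact hO 0 (by simp) (by simpa using (pvPrefix_two_iff '{' '{' (c :: (u' ++ t))).mpr h)
    have h2 : ¬ (c :: (u' ++ t)).take 2 = ['}', '}'] := by
      intro h
      exact hC 0 (by simp) (by simpa using (pvPrefix_two_iff '}' '}' (c :: (u' ++ t))).mpr h)
    have hrec := ih (d := d)
      (fun j hj => by simpa using hO (j + 1) (by simpa using Nat.succ_lt_succ hj))
      (fun j hj => by simpa using hC (j + 1) (by simpa using Nat.succ_lt_succ hj))
    rw [List.cons_append, pvGoA, if_neg h1, if_neg h2, hrec]
    split <;> simp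

lemma pvGoA_open (r : List Char) (d : Int) : pvGoA ('{' :: '{' :: r) d = pvGoA r (d + 1) := by
  rw [pvGoA]; simp

lemma pvGoA_close (r : List Char) (d : Int) : pvGoA ('}' :: '}' :: r) d = pvGoA r (d - 1) := by
  rw [pvGoA]; simp

-- no occurrence at all gives no prefix at any drop position
lemma pvNoPrefix_of_find_neg (t sub : List Char) (h : PySem.Chars.find t sub < 0) :
    ∀ j, ¬ sub <+: t.drop j := by
  have hne : PySem.Chars.find t sub = -1 := by
    have := PySem.Chars.neg_one_le_find t sub; omega
  have hinf : ¬ sub <:+: t := (PySem.Chars.find_eq_neg_one_iff t sub).mp hne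
  intro j hj
  exact hinf (by
    have : PySem.Chars.isIn sub t = true :=
      (PySem.Chars.exists_prefix_drop_iff_isIn sub t).mp ⟨j, hj⟩
    exact (PySem.Chars.isIn_iff_infix sub t).mp this)

-- core equivalence of the two loops
lemma pvMain (fuel : Nat) (t : List Char) (d : Int) (hf : t.length < fuel) :
    pvGoA t d = (pvGoB fuel t d).flatten := by
  induction fuel generalizing t d with
  | zero => omega
  | succ fuel ih =>
    rw [pvGoB]
    set o := PySem.Chars.find t ['{', '{'] with ho
    set c := PySem.Chars.find t ['}', '}'] with hc
    by_cases hnone : o < 0 ∧ c < 0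
    · rw [if_pos hnone,
        pvGoA_nomarker t d (pvNoPrefix_of_find_neg t _ hnone.1) (pvNoPrefix_of_find_neg t _ hnone.2)]
      split <;> simp
    · rw [if_neg hnone]
      by_cases hpick : c < 0 ∨ (0 ≤ o ∧ o < c)
      · -- next marker is '{{' at position o
        rw [if_pos hpick]
        have ho0 : 0 ≤ o := by
          rcases hpick with h | h
          · by_contra hx; exact hnone ⟨by omega, h⟩
          · exact h.1
        obtain ⟨hpre, hmin⟩ := PySem.Chars.find_spec (s := t) (sub := ['{', '{']) (by rw [← ho]; exact ho0)
        rw [← ho] at hpre hmin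
        have hCmin : ∀ j < o.toNat, ¬ ['}', '}'] <+: t.drop j := by
          intro j hj
          rcases hpick with h | h
          · exact pvNoPrefix_of_find_neg t _ h j
          · obtain ⟨hp2, hm2⟩ := PySem.Chars.find_spec (s := t) (sub := ['}', '}'])
              (by rw [← hc]; omega)
            rw [← hc] at hm2
            exact hm2 j (by omega)
        have hlen : o.toNat + 2 ≤ t.length := by
          have h2 : 2 ≤ (t.drop o.toNat).length := hpre.length_le
          simp [List.length_drop] at h2; omega
        have hdecomp : t = t.take o.toNat ++ ('{' :: '{' :: t.drop (o.toNat + 2)) := by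
          obtain ⟨s, hs⟩ := hpre
          have h1 : t.drop o.toNat = '{' :: '{' :: s := by simpa using hs.symm
          have h2 : t.drop (o.toNat + 2) = s := by
            rw [← List.drop_drop, h1]; rfl
          rw [h2, ← h1, List.take_append_drop]
        have hulen : (t.take o.toNat).length = o.toNat := by
          simp [List.length_take]; omega
        calc pvGoA t d
            = pvGoA (t.take o.toNat ++ ('{' :: '{' :: t.drop (o.toNat + 2))) d := by rw [← hdecomp]
          _ = (if d = 0 then t.take o.toNat else []) ++ pvGoA ('{' :: '{' :: t.drop (o.toNat + 2)) d := by
              exact pvGoA_skip _ _ d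
                (fun j hj => by rw [← hdecomp]; exact hmin j (by omega))
                (fun j hj => by rw [← hdecomp]; exact hCmin j (by omega))
          _ = (if d = 0 then t.take o.toNat else []) ++ pvGoA (t.drop (o.toNat + 2)) (d + 1) := by
              rw [pvGoA_open]
          _ = ((if d = 0 then [t.take o.toNat] else []) ++ pvGoB fuel (t.drop (o.toNat + 2)) (d + 1)).flatten := by
              rw [List.flatten_append, ← ih _ _ (by simp [List.length_drop]; omega)]
              split <;> simp
      · -- next marker is '}}' at position c
        rw [if_neg hpick]
        have hc0 : 0 ≤ c := by
          by_contra hx; exact hpick (Or.inl (by omega))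
        obtain ⟨hpre, hmin⟩ := PySem.Chars.find_spec (s := t) (sub := ['}', '}']) (by rw [← hc]; exact hc0)
        rw [← hc] at hpre hmin
        have hOmin : ∀ j < c.toNat, ¬ ['{', '{'] <+: t.drop j := by
          intro j hj
          by_cases hov : o < 0
          · exact pvNoPrefix_of_find_neg t _ hov j
          · obtain ⟨hp2, hm2⟩ := PySem.Chars.find_spec (s := t) (sub := ['{', '{'])
              (by rw [← ho]; omega)
            rw [← ho] at hm2
            have hco : c ≤ o := by
              rcases not_and_or.mp ((not_or.mp hpick).2) with h | h
              · omega
              · omega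
            exact hm2 j (by omega)
        have hlen : c.toNat + 2 ≤ t.length := by
          have h2 : 2 ≤ (t.drop c.toNat).length := hpre.length_le
          simp [List.length_drop] at h2; omega
        have hdecomp : t = t.take c.toNat ++ ('}' :: '}' :: t.drop (c.toNat + 2)) := by
          obtain ⟨s, hs⟩ := hpre
          have h1 : t.drop c.toNat = '}' :: '}' :: s := by simpa using hs.symm
          have h2 : t.drop (c.toNat + 2) = s := by
            rw [← List.drop_drop, h1]; rfl
          rw [h2, ← h1, List.take_append_drop]
        have hulen : (t.take c.toNat).length = c.toNat := by
          simp [List.length_take]; omega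
        calc pvGoA t d
            = pvGoA (t.take c.toNat ++ ('}' :: '}' :: t.drop (c.toNat + 2))) d := by rw [← hdecomp]
          _ = (if d = 0 then t.take c.toNat else []) ++ pvGoA ('}' :: '}' :: t.drop (c.toNat + 2)) d := by
              exact pvGoA_skip _ _ d
                (fun j hj => by rw [← hdecomp]; exact hOmin j (by omega))
                (fun j hj => by rw [← hdecomp]; exact hmin j (by omega))
          _ = (if d = 0 then t.take c.toNat else []) ++ pvGoA (t.drop (c.toNat + 2)) (d - 1) := by
              rw [pvGoA_close]
          _ = ((if d = 0 then [t.take c.toNat] else []) ++ pvGoB fuel (t.drop (c.toNat + 2)) (d - 1)).flatten := by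
              rw [List.flatten_append, ← ih _ _ (by simp [List.length_drop]; omega)]
              split <;> simp

-- ===== VERDICT (by name: the statement is the Claim_ definition above) =====
theorem remove_all_outermost_templates_py_spec : Claim_equal_remove_all_outermost_templates_py := by
  intro text _
  show remove_all_outermost_templates_py text = remove_all_outermost_templates_py_alt text
  unfold remove_all_outermost_templates_py remove_all_outermost_templates_py_alt
  rw [pvJoin_nil, ← pvMain _ _ _ (Nat.lt_succ_self _)]
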